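-- pv_equiv track=rewrite | github.com/navolotsky/stepik_cs_center_algorithms_and_methods | 8_2_5_longest_non-increasing_subsequnce_nlnn.py | lnis
-- ===== SOURCE A (Python) =====
-- def lnis(array):
--     arr_len = len(array)
--     predecessors = [None] * arr_len
--     found_lnis_indexes = [None] * (arr_len + 1)
--
--     cur_lnis_len = 0
--     for i in range(arr_len):
--         lo = 1
--         hi = cur_lnis_len
--         while lo <= hi:
--             mid = (lo + hi) // 2
--             if array[found_lnis_indexes[mid]] >= array[i]:
--                 lo = mid + 1
--             else:
--                 hi = mid - 1
--
--         new_lnis_len = lo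
--
--         predecessors[i] = found_lnis_indexes[new_lnis_len - 1]
--         found_lnis_indexes[new_lnis_len] = i
--
--         if new_lnis_len > cur_lnis_len:
--             cur_lnis_len = new_lnis_len
--
--     indexes = []
--     k = found_lnis_indexes[cur_lnis_len]
--     for _ in range(cur_lnis_len):
--         indexes.append(k)
--         k = predecessors[k]
--     indexes = [i + 1 for i in reversed(indexes)]
--     return cur_lnis_len, indexes
-- ===== SOURCE B (Python) =====
-- def lnis(array):
--     n = len(array)
--     dp = [0] * n
--     pred = [None] * n
--     best_len = 0
--     best_end = None
--     for i in range(n):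
--         best = 1
--         best_j = None
--         for j in range(i):
--             if array[j] >= array[i] and dp[j] + 1 >= best:
--                 best = dp[j] + 1
--                 best_j = j
--         dp[i] = best
--         pred[i] = best_j
--         if best >= best_len:
--             best_len = best
--             best_end = i
--     indexes = []
--     k = best_end
--     while k is not None:
--         indexes.append(k + 1)
--         k = pred[k]
--     indexes.reverse()
--     return best_len, indexes
-- ===== Notes on version B (the rewrite author's own statement) =====
-- stated objective: simpler
-- what changed: Replaces the patience-style binary-search-over-tails algorithm (found_lnis_indexes + bisection) by a plain quadratic dynamic program: dp[i] = longest non-increasing subsequence ending at i, computed by a direct scan over j < i, with the same last-index tie-breaking for predecessors and endpoint.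
import Mathlib
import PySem

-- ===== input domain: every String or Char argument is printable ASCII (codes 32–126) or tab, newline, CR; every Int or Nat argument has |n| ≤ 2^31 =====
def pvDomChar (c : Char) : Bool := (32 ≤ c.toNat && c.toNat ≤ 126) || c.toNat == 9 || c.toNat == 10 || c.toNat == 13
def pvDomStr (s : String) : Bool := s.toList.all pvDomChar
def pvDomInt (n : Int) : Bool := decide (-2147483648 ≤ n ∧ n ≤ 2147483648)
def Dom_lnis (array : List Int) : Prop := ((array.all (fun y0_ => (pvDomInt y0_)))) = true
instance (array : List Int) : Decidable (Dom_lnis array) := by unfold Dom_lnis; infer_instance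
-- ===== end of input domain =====

-- B replaces A's patience/binary-search algorithm by a plain quadratic dynamic program over
-- predecessor lengths (simpler to read; no speed claim — A is the asymptotically faster one).

-- ===== PORT A =====
-- A's binary-search tail read: array[found_lnis_indexes[mid]].  Python would raise TypeError
-- if found[mid] were None; for 1 ≤ mid ≤ cur_len that never happens, the 0 default is dead code.
def lnisTail (array : List Int) (found : List (Option Int)) (mid : Int) : Int :=
  match PySem.List.pyGetD found mid none with
  | some j => PySem.List.pyGetD array j 0
  | none => 0

-- the 'while lo <= hi' binary search of A.  The fuel argument only makes the loop total in
-- Lean: it is the loop's own measure hi+1-lo, which shrinks by at least one per iteration,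
-- so the fuel never runs out before the loop's own exit test lo > hi fires.
def lnisSearchAux (array : List Int) (found : List (Option Int)) (x : Int) :
    Nat → Int → Int → Int
  | 0, lo, _ => lo
  | fuel + 1, lo, hi =>
    if lo ≤ hi then
      if lnisTail array found (PySem.Int.floordiv (lo + hi) 2) ≥ x then
        lnisSearchAux array found x fuel (PySem.Int.floordiv (lo + hi) 2 + 1) hi
      else
        lnisSearchAux array found x fuel lo (PySem.Int.floordiv (lo + hi) 2 - 1)
    else lo

def lnisSearch (array : List Int) (found : List (Option Int)) (x lo hi : Int) : Int :=
  lnisSearchAux array found x (hi + 1 - lo).toNat lo hi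

-- one iteration of A's main loop; state = (predecessors, found_lnis_indexes, cur_lnis_len)
def lnisStep (array : List Int) (s : List (Option Int) × List (Option Int) × Int) (i : Int) :
    List (Option Int) × List (Option Int) × Int :=
  let newLen := lnisSearch array s.2.1 (PySem.List.pyGetD array i 0) 1 s.2.2
  let preds := PySem.List.pySetD s.1 i (PySem.List.pyGetD s.2.1 (newLen - 1) none)
  let found := PySem.List.pySetD s.2.1 newLen (some i)
  (preds, found, if newLen > s.2.2 then newLen else s.2.2)

-- one iteration of A's reconstruction loop; state = (indexes, k).  The 'none' branch is
-- dead code: Python would raise TypeError on predecessors[None], which never happens.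
def lnisRecon (preds : List (Option Int)) (t : List (Option Int) × Option Int) (_i : Int) :
    List (Option Int) × Option Int :=
  (t.1 ++ [t.2], match t.2 with
    | some j => PySem.List.pyGetD preds j none
    | none => none)

def lnis (array : List Int) : Int × List Int :=
  let arrLen := array.length
  let s := (PySem.List.pyRange 0 (arrLen : Int) 1).foldl (lnisStep array)
      (List.replicate arrLen none, List.replicate (arrLen + 1) none, 0)
  let t := (PySem.List.pyRange 0 s.2.2 1).foldl (lnisRecon s.1)
      ([], PySem.List.pyGetD s.2.1 s.2.2 none)
  -- 'o.getD 0' is dead code: every collected k is an int in Python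
  (s.2.2, t.1.reverse.map (fun o => o.getD 0 + 1))

-- ===== PORT B =====
-- B's inner scan: best length/last best predecessor over j in range(i)
def lnisAltInner (array dp : List Int) (i : Int) : Int × Option Int :=
  (PySem.List.pyRange 0 i 1).foldl
    (fun t j =>
      if PySem.List.pyGetD array j 0 ≥ PySem.List.pyGetD array i 0 ∧
          PySem.List.pyGetD dp j 0 + 1 ≥ t.1 then
        (PySem.List.pyGetD dp j 0 + 1, some j)
      else t)
    (1, none)

-- one iteration of B's outer loop; state = (dp, pred, best_len, best_end)
def lnisAltStep (array : List Int) (s : List Int × List (Option Int) × Int × Option Int)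
    (i : Int) : List Int × List (Option Int) × Int × Option Int :=
  let bb := lnisAltInner array s.1 i
  let dp := PySem.List.pySetD s.1 i bb.1
  let pred := PySem.List.pySetD s.2.1 i bb.2
  if bb.1 ≥ s.2.2.1 then (dp, pred, bb.1, some i) else (dp, pred, s.2.2.1, s.2.2.2)

-- B's 'while k is not None' reconstruction; the fuel argument only makes the loop total in
-- Lean (the predecessor chain is never longer than the list), it plays no algorithmic role.
def lnisAltChain (preds : List (Option Int)) : Nat → List Int → Option Int → List Int
  | _, acc, none => acc
  | 0, acc, some _ => acc
  | fuel + 1, acc, some j => lnisAltChain preds fuel (acc ++ [j + 1]) (PySem.List.pyGetD preds j none)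

def lnis_alt (array : List Int) : Int × List Int :=
  let n := array.length
  let s := (PySem.List.pyRange 0 (n : Int) 1).foldl (lnisAltStep array)
      (List.replicate n 0, List.replicate n none, 0, none)
  (s.2.2.1, (lnisAltChain s.2.1 (n + 1) [] s.2.2.2).reverse)

-- ===== PRECONDITION & SPEC =====
def Spec_lnis (array : List Int) (out : Int × List Int) : Prop := out = lnis_alt array
instance (array : List Int) (out : Int × List Int) : Decidable (Spec_lnis array out) := by unfold Spec_lnis; infer_instance

-- ===== CLAIM (what is proved, stated in full; the proofs are below) =====
def Claim_equal_lnis : Prop := ∀ (array : List Int), Dom_lnis array → Spec_lnis array (lnis array)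

-- ===== LEMMAS AND PROOFS =====

-- A-side loop state after the first m iterations
def stA (array : List Int) (m : Nat) : List (Option Int) × List (Option Int) × Int :=
  (PySem.List.pyRange 0 (m : Int) 1).foldl (lnisStep array)
    (List.replicate array.length none, List.replicate (array.length + 1) none, 0)

-- B-side loop state after the first m iterations
def stB (array : List Int) (m : Nat) : List Int × List (Option Int) × Int × Option Int :=
  (PySem.List.pyRange 0 (m : Int) 1).foldl (lnisAltStep array)
    (List.replicate array.length 0, List.replicate array.length none, 0, none)

-- B's dp value of index j after m iterations
def dpv (array : List Int) (m j : Nat) : Int := (stB array m).1.getD j 0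

-- the joint loop invariant
def InvAB (array : List Int) (m : Nat) : Prop :=
  (stB array m).2.1 = (stA array m).1 ∧
  (stA array m).1.length = array.length ∧
  (stA array m).2.1.length = array.length + 1 ∧
  (stB array m).1.length = array.length ∧
  (stB array m).2.2.1 = (stA array m).2.2 ∧
  0 ≤ (stA array m).2.2 ∧ (stA array m).2.2 ≤ (m : Int) ∧
  (stA array m).2.1.getD 0 none = none ∧
  (stB array m).2.2.2 = (stA array m).2.1.getD (stA array m).2.2.toNat none ∧
  (∀ l : Int, 1 ≤ l → l ≤ (stA array m).2.2 →
    ∃ j : Nat, j < m ∧ (stA array m).2.1.getD l.toNat none = some (j : Int) ∧ dpv array m j = l ∧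
      ∀ j' : Nat, j < j' → j' < m → dpv array m j' ≠ l) ∧
  (∀ j : Nat, j < m → 1 ≤ dpv array m j ∧ dpv array m j ≤ (stA array m).2.2) ∧
  (∀ j1 j2 : Nat, j1 < j2 → j2 < m → dpv array m j1 = dpv array m j2 →
    array.getD j1 0 < array.getD j2 0) ∧
  (∀ l1 l2 : Int, 1 ≤ l1 → l1 ≤ l2 → l2 ≤ (stA array m).2.2 →
    lnisTail array (stA array m).2.1 l2 ≤ lnisTail array (stA array m).2.1 l1) ∧
  (∀ j : Nat, j < m →
    ((stA array m).1.getD j none = none → dpv array m j = 1) ∧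
    (∀ z : Int, (stA array m).1.getD j none = some z →
      ∃ j'' : Nat, z = (j'' : Int) ∧ j'' < j ∧ dpv array m j'' = dpv array m j - 1))

theorem stA_succ (array : List Int) (m : Nat) :
    stA array (m + 1) = lnisStep array (stA array m) (m : Int) := by
  unfold stA
  rw [show ((m + 1 : Nat) : Int) = (m : Int) + 1 by push_cast; ring,
    PySem.List.pyRange_one_succ_right (by positivity), List.foldl_append]
  rfl

theorem stB_succ (array : List Int) (m : Nat) :
    stB array (m + 1) = lnisAltStep array (stB array m) (m : Int) := by
  unfold stB
  rw [show ((m + 1 : Nat) : Int) = (m : Int) + 1 by push_cast; ring,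
    PySem.List.pyRange_one_succ_right (by positivity), List.foldl_append]
  rfl

theorem stA_zero (array : List Int) :
    stA array 0 = (List.replicate array.length none, List.replicate (array.length + 1) none, 0) := by
  unfold stA
  rw [Int.natCast_zero, PySem.List.pyRange_one_eq_nil (le_refl 0)]
  rfl

theorem stB_zero (array : List Int) :
    stB array 0 = (List.replicate array.length 0, List.replicate array.length none, 0, none) := by
  unfold stB
  rw [Int.natCast_zero, PySem.List.pyRange_one_eq_nil (le_refl 0)]
  rfl

theorem getD_rep (n j : Nat) (d : Option Int) :
    (List.replicate n (none : Option Int)).getD j d = if j < n then none else d := by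
  simp [List.getD]
  split <;> simp_all

theorem getD_set_self {α : Type} (xs : List α) (n : Nat) (v d : α) (h : n < xs.length) :
    (xs.set n v).getD n d = v := by
  simp [List.getD, h]

theorem getD_set_ne {α : Type} (xs : List α) (n j : Nat) (v d : α) (h : j ≠ n) :
    (xs.set n v).getD j d = xs.getD j d := by
  simp [List.getD, List.getElem?_set_ne (Ne.symm h)]

theorem pyGetD_toNat {α : Type} (xs : List α) (i : Int) (d : α) (h : 0 ≤ i) :
    PySem.List.pyGetD xs i d = xs.getD i.toNat d := by
  have := PySem.List.pyGetD_natCast (xs := xs) (n := i.toNat) (d := d)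
  rwa [Int.toNat_of_nonneg h] at this

theorem searchAux_spec (array : List Int) (F : List (Option Int)) (x L : Int)
    (hmono : ∀ l1 l2 : Int, 1 ≤ l1 → l1 ≤ l2 → l2 ≤ L → lnisTail array F l2 ≤ lnisTail array F l1) :
    ∀ (fuel : Nat) (lo hi : Int), 1 ≤ lo → lo ≤ hi + 1 → hi ≤ L →
    (hi + 1 - lo).toNat ≤ fuel →
    (∀ l, 1 ≤ l → l < lo → x ≤ lnisTail array F l) →
    (∀ l, hi < l → l ≤ L → lnisTail array F l < x) →
    lo ≤ lnisSearchAux array F x fuel lo hi ∧ lnisSearchAux array F x fuel lo hi ≤ hi + 1 ∧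
    (∀ l, 1 ≤ l → l < lnisSearchAux array F x fuel lo hi → x ≤ lnisTail array F l) ∧
    (∀ l, lnisSearchAux array F x fuel lo hi ≤ l → l ≤ L → lnisTail array F l < x) := by
  intro fuel
  induction fuel with
  | zero =>
    intro lo hi hlo hlohi hhi hfuel hpre hpost
    have hba : lo = hi + 1 := by omega
    rw [show lnisSearchAux array F x 0 lo hi = lo from rfl]
    exact ⟨le_refl _, by omega, fun l h1 h2 => hpre l h1 h2, fun l h1 h2 => hpost l (by omega) h2⟩
  | succ f ih =>
    intro lo hi hlo hlohi hhi hfuel hpre hpost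
    by_cases h : lo ≤ hi
    · have hb := PySem.Int.floordiv_two_mid_bounds (lo := lo) (hi := hi) h
      rw [show lnisSearchAux array F x (f + 1) lo hi =
          (if lo ≤ hi then
            (if lnisTail array F (PySem.Int.floordiv (lo + hi) 2) ≥ x then
              lnisSearchAux array F x f (PySem.Int.floordiv (lo + hi) 2 + 1) hi
            else lnisSearchAux array F x f lo (PySem.Int.floordiv (lo + hi) 2 - 1))
          else lo) from rfl, if_pos h]
      by_cases ht : lnisTail array F (PySem.Int.floordiv (lo + hi) 2) ≥ x
      · rw [if_pos ht]
        have hres := ih (PySem.Int.floordiv (lo + hi) 2 + 1) hi (by omega) (by omega) hhi (by omega)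
          (fun l h1 h2 => by
            by_cases hc : l < lo
            · exact hpre l h1 hc
            · exact le_trans ht (hmono l _ h1 (by omega) (by omega)))
          hpost
        exact ⟨by have := hres.1; omega, hres.2.1, hres.2.2.1, hres.2.2.2⟩
      · rw [if_neg ht]
        have hres := ih lo (PySem.Int.floordiv (lo + hi) 2 - 1) hlo (by omega) (by omega) (by omega) hpre
          (fun l h1 h2 => by
            by_cases hc : hi < l
            · exact hpost l hc h2
            · calc lnisTail array F l ≤ lnisTail array F (PySem.Int.floordiv (lo + hi) 2) :=
                    hmono _ l (by omega) (by omega) (by omega)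
                _ < x := lt_of_not_ge ht)
        exact ⟨hres.1, by have := hres.2.1; omega, hres.2.2.1, hres.2.2.2⟩
    · rw [show lnisSearchAux array F x (f + 1) lo hi =
          (if lo ≤ hi then
            (if lnisTail array F (PySem.Int.floordiv (lo + hi) 2) ≥ x then
              lnisSearchAux array F x f (PySem.Int.floordiv (lo + hi) 2 + 1) hi
            else lnisSearchAux array F x f lo (PySem.Int.floordiv (lo + hi) 2 - 1))
          else lo) from rfl, if_neg h]
      exact ⟨le_refl _, by omega, fun l h1 h2 => hpre l h1 h2, fun l h1 h2 => hpost l (by omega) h2⟩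

theorem search_spec (array : List Int) (F : List (Option Int)) (x L : Int)
    (hmono : ∀ l1 l2 : Int, 1 ≤ l1 → l1 ≤ l2 → l2 ≤ L → lnisTail array F l2 ≤ lnisTail array F l1) :
    ∀ lo hi : Int, 1 ≤ lo → lo ≤ hi + 1 → hi ≤ L →
    (∀ l, 1 ≤ l → l < lo → x ≤ lnisTail array F l) →
    (∀ l, hi < l → l ≤ L → lnisTail array F l < x) →
    lo ≤ lnisSearch array F x lo hi ∧ lnisSearch array F x lo hi ≤ hi + 1 ∧
    (∀ l, 1 ≤ l → l < lnisSearch array F x lo hi → x ≤ lnisTail array F l) ∧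
    (∀ l, lnisSearch array F x lo hi ≤ l → l ≤ L → lnisTail array F l < x) := by
  intro lo hi hlo hlohi hhi hpre hpost
  exact searchAux_spec array F x L hmono _ lo hi hlo hlohi hhi (le_refl _) hpre hpost

-- the state of B's inner scan after its first m' iterations (i is the outer index)
def innerSt (array D : List Int) (i : Int) (m' : Nat) : Int × Option Int :=
  (PySem.List.pyRange 0 (m' : Int) 1).foldl
    (fun t j =>
      if PySem.List.pyGetD array j 0 ≥ PySem.List.pyGetD array i 0 ∧
          PySem.List.pyGetD D j 0 + 1 ≥ t.1 then
        (PySem.List.pyGetD D j 0 + 1, some j)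
      else t)
    (1, none)

theorem innerSt_eq (array D : List Int) (m : Nat) :
    lnisAltInner array D (m : Int) = innerSt array D (m : Int) m := rfl

theorem innerSt_succ (array D : List Int) (i : Int) (m' : Nat) :
    innerSt array D i (m' + 1) =
      (if array.getD m' 0 ≥ PySem.List.pyGetD array i 0 ∧
          D.getD m' 0 + 1 ≥ (innerSt array D i m').1 then
        (D.getD m' 0 + 1, some (m' : Int))
      else innerSt array D i m') := by
  unfold innerSt
  rw [show ((m' + 1 : Nat) : Int) = (m' : Int) + 1 by push_cast; ring,
    PySem.List.pyRange_one_succ_right (by positivity), List.foldl_append]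
  simp [PySem.List.pyGetD_natCast]

theorem inner_spec (array D : List Int) (m : Nat) (hD : ∀ j : Nat, j < m → 1 ≤ D.getD j 0) :
    ∀ m' : Nat, m' ≤ m →
    ((innerSt array D (m : Int) m').2 = none ∧ (innerSt array D (m : Int) m').1 = 1 ∧
      ∀ j : Nat, j < m' → ¬ array.getD m 0 ≤ array.getD j 0) ∨
    (∃ jq : Nat, (innerSt array D (m : Int) m').2 = some (jq : Int) ∧ jq < m' ∧
      array.getD m 0 ≤ array.getD jq 0 ∧
      (innerSt array D (m : Int) m').1 = D.getD jq 0 + 1 ∧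
      (∀ j : Nat, j < m' → array.getD m 0 ≤ array.getD j 0 →
        D.getD j 0 + 1 ≤ (innerSt array D (m : Int) m').1) ∧
      (∀ j : Nat, jq < j → j < m' → array.getD m 0 ≤ array.getD j 0 →
        D.getD j 0 + 1 ≠ (innerSt array D (m : Int) m').1)) := by
  intro m'
  induction m' with
  | zero =>
    intro _
    left
    refine ⟨?_, ?_, fun j hj => absurd hj (by omega)⟩ <;>
      simp [innerSt, PySem.List.pyRange_one_eq_nil (le_refl (0 : Int))]
  | succ k ih =>
    intro hk
    have ihk := ih (by omega)
    rw [innerSt_succ]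
    simp only [PySem.List.pyGetD_natCast, ge_iff_le]
    by_cases hc : array.getD m 0 ≤ array.getD k 0 ∧ (innerSt array D (m : Int) k).1 ≤ D.getD k 0 + 1
    · rw [if_pos hc]
      right
      refine ⟨k, rfl, by omega, hc.1, rfl, ?_, ?_⟩
      · intro j hj hq
        rcases Nat.lt_or_ge j k with hjk | hjk
        · rcases ihk with ⟨_, h1, hnq⟩ | ⟨jq, _, _, _, h1, hmax, _⟩
          · exact absurd hq (hnq j hjk)
          · exact le_trans (hmax j hjk hq) hc.2
        · have : j = k := by omega
          subst this; exact le_refl _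
      · intro j hj1 hj2 _
        omega
    · rw [if_neg hc]
      rcases ihk with ⟨h0, h1, hnq⟩ | ⟨jq, h0, hjq, hq, h1, hmax, hlast⟩
      · left
        refine ⟨h0, h1, ?_⟩
        intro j hj hq
        rcases Nat.lt_or_ge j k with hjk | hjk
        · exact hnq j hjk hq
        · have : j = k := by omega
          subst this
          have := hD j (by omega)
          exact hc ⟨hq, by omega⟩
      · right
        refine ⟨jq, h0, by omega, hq, h1, ?_, ?_⟩
        · intro j hj hq'
          rcases Nat.lt_or_ge j k with hjk | hjk
          · exact hmax j hjk hq'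
          · have : j = k := by omega
            subst this
            have : ¬ (innerSt array D (m : Int) j).1 ≤ D.getD j 0 + 1 := fun h => hc ⟨hq', h⟩
            omega
        · intro j hj1 hj2 hq'
          rcases Nat.lt_or_ge j k with hjk | hjk
          · exact hlast j hj1 hjk hq'
          · have : j = k := by omega
            subst this
            have : ¬ (innerSt array D (m : Int) j).1 ≤ D.getD j 0 + 1 := fun h => hc ⟨hq', h⟩
            omega

theorem InvAB_zero (array : List Int) : InvAB array 0 := by
  unfold InvAB
  simp only [stA_zero, stB_zero, dpv]
  refine ⟨by trivial, by simp, by simp, by simp, by trivial, by simp, by simp, ?_, ?_, ?_, ?_, ?_, ?_, ?_⟩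
  · rw [getD_rep]; simp
  · show (none : Option Int) = _
    rw [Int.toNat_zero, getD_rep]; simp
  · intro l h1 h2; omega
  · intro j hj; omega
  · intro j1 j2 h1 h2; omega
  · intro l1 l2 h1 h2 h3; omega
  · intro j hj; omega

theorem lnisStep_comp (array : List Int) (P F : List (Option Int)) (L i : Int) :
    lnisStep array (P, F, L) i =
      (PySem.List.pySetD P i
        (PySem.List.pyGetD F (lnisSearch array F (PySem.List.pyGetD array i 0) 1 L - 1) none),
       PySem.List.pySetD F (lnisSearch array F (PySem.List.pyGetD array i 0) 1 L) (some i),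
       if lnisSearch array F (PySem.List.pyGetD array i 0) 1 L > L then
         lnisSearch array F (PySem.List.pyGetD array i 0) 1 L
       else L) := rfl

theorem lnisAltStep_comp (array D : List Int) (Q : List (Option Int)) (BL : Int)
    (BE : Option Int) (i : Int) :
    lnisAltStep array (D, Q, BL, BE) i =
      (PySem.List.pySetD D i (lnisAltInner array D i).1,
       PySem.List.pySetD Q i (lnisAltInner array D i).2,
       (if (lnisAltInner array D i).1 ≥ BL then (lnisAltInner array D i).1 else BL),
       (if (lnisAltInner array D i).1 ≥ BL then some i else BE)) := by
  unfold lnisAltStep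
  dsimp only
  split_ifs <;> rfl

theorem Inv_step (array : List Int) (m : Nat) (hm : m < array.length) :
    InvAB array m → InvAB array (m + 1) := by
  intro hInv
  rcases hB : stB array m with ⟨D, P, L, BE⟩
  rcases hA : stA array m with ⟨Ptmp, F, Ltmp⟩
  unfold InvAB at hInv
  rw [hA, hB] at hInv
  have hdpvm : ∀ j : Nat, dpv array m j = D.getD j 0 := by
    intro j; unfold dpv; rw [hB]
  simp only [hdpvm] at hInv
  obtain ⟨hQP, hlenP, hlenF, hlenD, hBL, hL0, hLm, hF0, hBE, hlev, hbnd, hstr, htails, hchain⟩ := hInv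
  subst hQP
  subst hBL
  subst hBE
  obtain ⟨hr1, hr2, hTge, hTlt⟩ :=
    search_spec array F (array.getD m 0) L htails 1 L (le_refl 1) (by omega) (le_refl L)
      (by intro l h1 h2; omega) (by intro l h1 h2; omega)
  have hlevT : ∀ l : Int, 1 ≤ l → l ≤ L → ∃ j : Nat, j < m ∧
      F.getD l.toNat none = some (j : Int) ∧ D.getD j 0 = l ∧
      (∀ j' : Nat, j < j' → j' < m → D.getD j' 0 ≠ l) ∧
      lnisTail array F l = array.getD j 0 := by
    intro l h1 h2
    obtain ⟨j, hjm, hFl, hdj, huniq⟩ := hlev l h1 h2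
    refine ⟨j, hjm, hFl, hdj, huniq, ?_⟩
    unfold lnisTail
    rw [pyGetD_toNat F l none (by omega), hFl]
    dsimp only
    rw [PySem.List.pyGetD_natCast]
  have hmaxlev : ∀ l : Int, 1 ≤ l → l ≤ L → ∀ j : Nat, j < m → D.getD j 0 = l →
      array.getD j 0 ≤ lnisTail array F l := by
    intro l h1 h2 j hjm hdj
    obtain ⟨js, hjsm, hFs, hds, huniq, hT⟩ := hlevT l h1 h2
    rw [hT]
    rcases lt_trichotomy j js with h | h | h
    · exact le_of_lt (hstr j js h hjsm (by rw [hdj, hds]))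
    · rw [h]
    · exact absurd hdj (huniq j h hjm)
  have hD1 : ∀ j : Nat, j < m → 1 ≤ D.getD j 0 := fun j hj => (hbnd j hj).1
  have hin := inner_spec array D m hD1 m (le_refl m)
  have hkey : (innerSt array D (m : Int) m).1 = lnisSearch array F (array.getD m 0) 1 L ∧
      (innerSt array D (m : Int) m).2 =
        PySem.List.pyGetD F (lnisSearch array F (array.getD m 0) 1 L - 1) none := by
    rcases hin with ⟨hbjn, hb1, hnq⟩ | ⟨jq, hbj, hjqm, hqual, hbq, hmax, hlast⟩
    · have hre : lnisSearch array F (array.getD m 0) 1 L = 1 := by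
        by_contra hne
        obtain ⟨j, hjm, _, _, _, hT⟩ :=
          hlevT (lnisSearch array F (array.getD m 0) 1 L - 1) (by omega) (by omega)
        exact hnq j hjm (by rw [← hT]; exact hTge _ (by omega) (by omega))
      constructor
      · rw [hb1, hre]
      · rw [hbjn, hre]
        rw [show (1 : Int) - 1 = 0 by ring, pyGetD_toNat F 0 none (le_refl 0), Int.toNat_zero, hF0]
    · have hlq := hbnd jq hjqm
      have hge : D.getD jq 0 + 1 ≤ lnisSearch array F (array.getD m 0) 1 L := by
        by_contra hcon
        have h1 := hTlt (D.getD jq 0) (by omega) (by omega)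
        have h2 := hmaxlev (D.getD jq 0) (by omega) (by omega) jq hjqm rfl
        omega
      have hle : lnisSearch array F (array.getD m 0) 1 L ≤ D.getD jq 0 + 1 := by
        by_contra hcon
        obtain ⟨j', hj'm, _, hdj', _, hT⟩ := hlevT (D.getD jq 0 + 1) (by omega) (by omega)
        have hq' : array.getD m 0 ≤ array.getD j' 0 := by
          rw [← hT]; exact hTge _ (by omega) (by omega)
        have hmx := hmax j' hj'm hq'
        rw [hbq, hdj'] at hmx
        omega
      obtain ⟨js, hjsm, hFs, hds, huniqs, hTs⟩ := hlevT (D.getD jq 0) (by omega) (by omega)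
      have hjj : jq = js := by
        rcases lt_trichotomy jq js with h | h | h
        · exfalso
          have hqjs : array.getD m 0 ≤ array.getD js 0 := by
            rw [← hTs]; exact hTge _ (by omega) (by omega)
          exact hlast js h hjsm hqjs (by rw [hds, hbq])
        · exact h
        · exact absurd rfl (huniqs jq h hjqm)
      constructor
      · rw [hbq]; omega
      · rw [hbj, pyGetD_toNat F _ none (by omega),
          show (lnisSearch array F (array.getD m 0) 1 L - 1).toNat = (D.getD jq 0).toNat by omega,
          hFs, hjj]
  set r := lnisSearch array F (array.getD m 0) 1 L with hrdef
  have hAS : stA array (m + 1) =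
      (P.set m (PySem.List.pyGetD F (r - 1) none), F.set r.toNat (some (m : Int)),
        if r > L then r else L) := by
    rw [stA_succ, hA, lnisStep_comp, PySem.List.pyGetD_natCast, ← hrdef,
      PySem.List.pySetD_natCast, PySem.List.pySetD_of_nonneg F (some (m : Int)) (by omega)]
  have hBS : stB array (m + 1) =
      (D.set m r, P.set m (PySem.List.pyGetD F (r - 1) none),
        (if r ≥ L then r else L), (if r ≥ L then some (m : Int) else F.getD L.toNat none)) := by
    rw [stB_succ, hB, lnisAltStep_comp, innerSt_eq, hkey.1, hkey.2,
      PySem.List.pySetD_natCast, PySem.List.pySetD_natCast]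
  have hdpv1 : ∀ j : Nat, dpv array (m + 1) j = (D.set m r).getD j 0 := by
    intro j; unfold dpv; rw [hBS]
  have hmP : m < P.length := by omega
  have hmD : m < D.length := by omega
  have hrtop : r.toNat < F.length := by omega
  have hT'ne : ∀ l : Int, 0 ≤ l → l ≠ r →
      lnisTail array (F.set r.toNat (some (m : Int))) l = lnisTail array F l := by
    intro l h0 hne
    unfold lnisTail
    rw [pyGetD_toNat _ l none h0, pyGetD_toNat F l none h0, getD_set_ne _ _ _ _ _ (by omega)]
  have hT'r : lnisTail array (F.set r.toNat (some (m : Int))) r = array.getD m 0 := by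
    unfold lnisTail
    rw [pyGetD_toNat _ r none (by omega), getD_set_self _ _ _ _ hrtop]
    dsimp only
    rw [PySem.List.pyGetD_natCast]
  unfold InvAB
  simp only [hdpv1]
  rw [hAS, hBS]
  try dsimp only
  refine ⟨rfl, by simp [hlenP], by simp [hlenF], by simp [hlenD], ?_, ?_, ?_, ?_, ?_, ?_, ?_, ?_, ?_, ?_⟩
  · split_ifs <;> omega
  · split_ifs <;> omega
  · push_cast; split_ifs <;> omega
  · rw [getD_set_ne _ _ _ _ _ (by omega)]; exact hF0
  · rcases lt_trichotomy r L with h | h | h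
    · rw [if_neg (by omega), if_neg (by omega), getD_set_ne _ _ _ _ _ (by omega)]
    · rw [if_pos (by omega), if_neg (by omega), h, getD_set_self _ _ _ _ (by omega)]
    · rw [if_pos (by omega), if_pos (by omega), getD_set_self _ _ _ _ hrtop]
  · intro l h1 h2
    by_cases hlr : l = r
    · refine ⟨m, by omega, ?_, ?_, ?_⟩
      · rw [hlr, getD_set_self _ _ _ _ hrtop]
      · rw [getD_set_self _ _ _ _ hmD, hlr]
      · intro j' hj1 hj2; omega
    · have hlL : l ≤ L := by split_ifs at h2 <;> omega
      obtain ⟨j, hjm, hFj, hdj, huniq⟩ := hlev l h1 hlL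
      refine ⟨j, by omega, ?_, ?_, ?_⟩
      · rw [getD_set_ne _ _ _ _ _ (by omega : l.toNat ≠ r.toNat)]; exact hFj
      · rw [getD_set_ne _ _ _ _ _ (by omega : j ≠ m)]; exact hdj
      · intro j' hj1 hj2
        by_cases hj'm : j' = m
        · rw [hj'm, getD_set_self _ _ _ _ hmD]; omega
        · rw [getD_set_ne _ _ _ _ _ hj'm]; exact huniq j' hj1 (by omega)
  · intro j hj
    by_cases hjm : j = m
    · rw [hjm, getD_set_self _ _ _ _ hmD]; split_ifs <;> omega
    · rw [getD_set_ne _ _ _ _ _ hjm]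
      have := hbnd j (by omega)
      split_ifs <;> omega
  · intro j1 j2 h12 hj2 hdeq
    by_cases hj2m : j2 = m
    · subst hj2m
      rw [getD_set_ne _ _ _ _ _ (by omega : j1 ≠ j2), getD_set_self _ _ _ _ hmD] at hdeq
      have hb1 := hbnd j1 (by omega)
      have h1 := hTlt r (le_refl r) (by omega)
      have h2 := hmaxlev r (by omega) (by omega) j1 (by omega) hdeq
      omega
    · rw [getD_set_ne _ _ _ _ _ hj2m, getD_set_ne _ _ _ _ _ (by omega : j1 ≠ m)] at hdeq
      exact hstr j1 j2 h12 (by omega) hdeq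
  · intro l1 l2 h1 h12 h2
    by_cases e1 : l1 = r <;> by_cases e2 : l2 = r
    · rw [e1, e2]
    · have hl2L : l2 ≤ L := by split_ifs at h2 <;> omega
      rw [e1, hT'r, hT'ne l2 (by omega) e2]
      have := hTlt l2 (by omega) hl2L
      omega
    · rw [e2, hT'r, hT'ne l1 (by omega) e1]
      exact hTge l1 (by omega) (by omega)
    · have hl2L : l2 ≤ L := by split_ifs at h2 <;> omega
      rw [hT'ne l1 (by omega) e1, hT'ne l2 (by omega) e2]
      exact htails l1 l2 h1 h12 hl2L
  · intro j hj
    by_cases hjm : j = m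
    · subst hjm
      constructor
      · intro hnone
        rw [getD_set_self _ _ _ _ hmP] at hnone
        rw [getD_set_self _ _ _ _ hmD]
        by_contra hne
        obtain ⟨js, -, hFs, -, -, -⟩ := hlevT (r - 1) (by omega) (by omega)
        rw [pyGetD_toNat F _ none (by omega), hFs] at hnone
        simp at hnone
      · intro z hz
        rw [getD_set_self _ _ _ _ hmP] at hz
        by_cases hr1' : r = 1
        · rw [hr1', show (1 : Int) - 1 = 0 by ring,
            pyGetD_toNat F 0 none (le_refl 0), Int.toNat_zero, hF0] at hz
          simp at hz
        · obtain ⟨js, hjsm, hFs, hds, -, -⟩ := hlevT (r - 1) (by omega) (by omega)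
          rw [pyGetD_toNat F _ none (by omega), hFs] at hz
          refine ⟨js, (Option.some.inj hz).symm, by omega, ?_⟩
          rw [getD_set_ne _ _ _ _ _ (by omega : js ≠ j), getD_set_self _ _ _ _ hmD, hds]
    · have hc := hchain j (by omega)
      constructor
      · intro hnone
        rw [getD_set_ne _ _ _ _ _ hjm] at hnone
        rw [getD_set_ne _ _ _ _ _ hjm]
        exact hc.1 hnone
      · intro z hz
        rw [getD_set_ne _ _ _ _ _ hjm] at hz
        obtain ⟨j'', hzz, hlt, hdd⟩ := hc.2 z hz
        refine ⟨j'', hzz, hlt, ?_⟩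
        rw [getD_set_ne _ _ _ _ _ (by omega : j'' ≠ m), getD_set_ne _ _ _ _ _ hjm]
        exact hdd

theorem Inv_all (array : List Int) (m : Nat) (hm : m ≤ array.length) : InvAB array m := by
  induction m with
  | zero => exact InvAB_zero array
  | succ k ih => exact Inv_step array k (by omega) (ih (by omega))

-- the sequence of indices visited by either reconstruction loop
def chainSeq (preds : List (Option Int)) : Nat → Option Int → List (Option Int)
  | 0, _ => []
  | _ + 1, none => []
  | l + 1, some j => some j :: chainSeq preds l (PySem.List.pyGetD preds j none)

-- k points (one-past the pred chain) at a dp-level-l index of the fully processed arrays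
def ChainHyp (array : List Int) (l : Nat) (k : Option Int) : Prop :=
  (l = 0 ∧ k = none) ∨
  (∃ jn : Nat, k = some (jn : Int) ∧ jn < array.length ∧ 0 < l ∧
    dpv array array.length jn = (l : Int))

theorem chain_next (array : List Int) (P : List (Option Int))
    (hchain : ∀ j : Nat, j < array.length →
      (P.getD j none = none → dpv array array.length j = 1) ∧
      (∀ z : Int, P.getD j none = some z → ∃ j'' : Nat, z = (j'' : Int) ∧ j'' < j ∧
        dpv array array.length j'' = dpv array array.length j - 1))
    (hbnd : ∀ j : Nat, j < array.length → 1 ≤ dpv array array.length j)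
    (l : Nat) (jn : Nat) (hjn : jn < array.length)
    (hd : dpv array array.length jn = (l : Int) + 1) :
    ChainHyp array l (PySem.List.pyGetD P (jn : Int) none) := by
  rw [PySem.List.pyGetD_natCast]
  rcases hcase : P.getD jn none with _ | z
  · left
    have h1 := (hchain jn hjn).1 hcase
    exact ⟨by omega, rfl⟩
  · obtain ⟨j'', hz, hlt, hdd⟩ := (hchain jn hjn).2 z hcase
    right
    have hb := hbnd j'' (by omega)
    refine ⟨j'', by rw [hz], by omega, by omega, by omega⟩

theorem reconA_eq (array : List Int) (P : List (Option Int))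
    (hchain : ∀ j : Nat, j < array.length →
      (P.getD j none = none → dpv array array.length j = 1) ∧
      (∀ z : Int, P.getD j none = some z → ∃ j'' : Nat, z = (j'' : Int) ∧ j'' < j ∧
        dpv array array.length j'' = dpv array array.length j - 1))
    (hbnd : ∀ j : Nat, j < array.length → 1 ≤ dpv array array.length j) :
    ∀ (is : List Int) (acc : List (Option Int)) (k : Option Int),
      ChainHyp array is.length k →
      (is.foldl (lnisRecon P) (acc, k)).1 = acc ++ chainSeq P is.length k := by
  intro is
  induction is with
  | nil =>
    intro acc k _
    simp [chainSeq]
  | cons i is ih =>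
    intro acc k hk
    rcases hk with ⟨h0, -⟩ | ⟨jn, hks, hjn, -, hd⟩
    · simp at h0
    · subst hks
      rw [List.foldl_cons,
        show lnisRecon P (acc, some ((jn : Nat) : Int)) i =
          (acc ++ [some ((jn : Nat) : Int)], PySem.List.pyGetD P ((jn : Nat) : Int) none) from rfl,
        ih _ _ (chain_next array P hchain hbnd is.length jn hjn (by exact_mod_cast hd))]
      simp [chainSeq]

theorem chainB_eq (array : List Int) (P : List (Option Int))
    (hchain : ∀ j : Nat, j < array.length →
      (P.getD j none = none → dpv array array.length j = 1) ∧
      (∀ z : Int, P.getD j none = some z → ∃ j'' : Nat, z = (j'' : Int) ∧ j'' < j ∧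
        dpv array array.length j'' = dpv array array.length j - 1))
    (hbnd : ∀ j : Nat, j < array.length → 1 ≤ dpv array array.length j) :
    ∀ (l fuel : Nat) (acc : List Int) (k : Option Int),
      ChainHyp array l k → l ≤ fuel →
      lnisAltChain P fuel acc k = acc ++ (chainSeq P l k).map (fun o => o.getD 0 + 1) := by
  intro l
  induction l with
  | zero =>
    intro fuel acc k hk _
    rcases hk with ⟨-, rfl⟩ | ⟨jn, -, -, h0, -⟩
    · cases fuel <;> simp [lnisAltChain, chainSeq]
    · omega
  | succ l ih =>
    intro fuel acc k hk hf
    rcases hk with ⟨h0, -⟩ | ⟨jn, hks, hjn, -, hd⟩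
    · omega
    · subst hks
      cases fuel with
      | zero => omega
      | succ f =>
        rw [show lnisAltChain P (f + 1) acc (some ((jn : Nat) : Int)) =
            lnisAltChain P f (acc ++ [((jn : Nat) : Int) + 1])
              (PySem.List.pyGetD P ((jn : Nat) : Int) none) from rfl,
          ih f _ _ (chain_next array P hchain hbnd l jn hjn (by exact_mod_cast hd)) (by omega)]
        simp [chainSeq]

-- ===== VERDICT (by name: the statement is the Claim_ definition above) =====
theorem lnis_spec : Claim_equal_lnis := by
  intro array _
  unfold Spec_lnis
  have hInv := Inv_all array array.length (le_refl _)
  unfold InvAB at hInv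
  rcases hB : stB array array.length with ⟨D, P, L, BE⟩
  rcases hA : stA array array.length with ⟨Ptmp, F, Ltmp⟩
  rw [hA, hB] at hInv
  dsimp only at hInv
  obtain ⟨hQP, hlenP, hlenF, hlenD, hBL, hL0, hLm, hF0, hBE, hlev, hbnd, hstr, htails, hchain⟩ := hInv
  subst hQP
  subst hBL
  subst hBE
  have hchain' : ∀ j : Nat, j < array.length →
      (P.getD j none = none → dpv array array.length j = 1) ∧
      (∀ z : Int, P.getD j none = some z → ∃ j'' : Nat, z = (j'' : Int) ∧ j'' < j ∧
        dpv array array.length j'' = dpv array array.length j - 1) := hchain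
  have hbnd1 : ∀ j : Nat, j < array.length → 1 ≤ dpv array array.length j :=
    fun j hj => (hbnd j hj).1
  have hk0 : ChainHyp array L.toNat (F.getD L.toNat none) := by
    by_cases hL : L = 0
    · left
      refine ⟨by omega, ?_⟩
      rw [hL, Int.toNat_zero]
      exact hF0
    · obtain ⟨j, hjm, hFj, hdj, -⟩ := hlev L (by omega) (le_refl L)
      right
      exact ⟨j, hFj, hjm, by omega, by omega⟩
  have hAeq : lnis array = ((stA array array.length).2.2,
      (((PySem.List.pyRange 0 (stA array array.length).2.2 1).foldl
        (lnisRecon (stA array array.length).1)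
        ([], PySem.List.pyGetD (stA array array.length).2.1 (stA array array.length).2.2 none)).1).reverse.map
        (fun o => o.getD 0 + 1)) := rfl
  have hBeq : lnis_alt array = ((stB array array.length).2.2.1,
      (lnisAltChain (stB array array.length).2.1 (array.length + 1) []
        (stB array array.length).2.2.2).reverse) := rfl
  rw [hAeq, hBeq, hA, hB]
  dsimp only
  rw [pyGetD_toNat F L none hL0]
  have hlen : (PySem.List.pyRange 0 L 1).length = L.toNat := by
    rw [PySem.List.length_pyRange_one]
    simp
  rw [reconA_eq array P hchain' hbnd1 (PySem.List.pyRange 0 L 1) []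
      (F.getD L.toNat none) (by rw [hlen]; exact hk0), hlen,
    chainB_eq array P hchain' hbnd1 L.toNat (array.length + 1) []
      (F.getD L.toNat none) hk0 (by omega)]
  simp [List.map_reverse]
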